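-- pv_equiv track=rewrite | github.com/GohnV/RegisterSetAutomata | RsA.py | intersectSets
-- ===== SOURCE A (Python) =====
-- MYEMPTY = (' ', frozenset())
--
-- def myIntersection(t1, t2):
--     if t1[0] == '^' and t2[0] == '^':
--         return ('^', t1[1].union(t2[1]))
--     elif t1[0] == '^':
--         return (' ', t2[1].difference(t1[1]))
--     elif t2[0] == '^':
--         return (' ', t1[1].difference(t2[1]))
--     else:
--         return (' ', t1[1].intersection(t2[1]))
--
-- def intersectSets(sets):
--     n = len(sets)
--     if n >= 1:
--         tmp = sets[0]
--         for i in range(1, n):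
--             tmp = myIntersection(tmp, sets[i])
--         return tmp
--     else:
--         return MYEMPTY
-- ===== SOURCE B (Python) =====
-- MYEMPTY = (' ', frozenset())
--
-- def intersectSets(sets):
--     # Group-wise: one union over complemented sets, one intersection over
--     # normal sets, one difference -- instead of A's sequential pairwise fold.
--     if not sets:
--         return MYEMPTY
--     if len(sets) == 1:
--         return sets[0]
--     neg = [s for f, s in sets if f == '^']
--     pos = [s for f, s in sets if f != '^']
--     if not pos:
--         return ('^', frozenset().union(*neg))
--     return (' ', pos[0].intersection(*pos[1:]).difference(*neg))
-- ===== Notes on version B (the rewrite author's own statement) =====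
-- stated objective: simpler
-- what changed: B replaces A's sequential pairwise myIntersection fold with one grouped pass: union all complemented payloads, intersect all normal ones, and take a single difference, never calling myIntersection.
import Mathlib
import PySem

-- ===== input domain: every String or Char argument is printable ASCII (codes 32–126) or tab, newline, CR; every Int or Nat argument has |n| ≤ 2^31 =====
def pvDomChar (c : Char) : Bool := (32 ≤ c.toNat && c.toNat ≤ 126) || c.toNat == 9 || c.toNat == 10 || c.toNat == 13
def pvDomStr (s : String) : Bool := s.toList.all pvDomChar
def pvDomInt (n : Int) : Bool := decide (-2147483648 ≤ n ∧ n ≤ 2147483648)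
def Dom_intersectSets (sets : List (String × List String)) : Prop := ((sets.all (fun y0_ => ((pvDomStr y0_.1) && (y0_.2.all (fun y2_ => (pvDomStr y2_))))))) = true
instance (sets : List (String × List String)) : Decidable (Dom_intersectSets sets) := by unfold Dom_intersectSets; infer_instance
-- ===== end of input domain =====

-- B replaces A's sequential pairwise myIntersection fold by one grouped pass:
-- union over the complemented sets, intersection over the normal ones, one difference (objective: simpler).

-- ===== PORT A =====
def MYEMPTY : String × List String := (" ", [])

def myIntersection (t1 t2 : String × List String) : String × List String :=
  if t1.1 == "^" && t2.1 == "^" then ("^", PySem.Set.union t1.2 t2.2)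
  else if t1.1 == "^" then (" ", PySem.Set.diff t2.2 t1.2)
  else if t2.1 == "^" then (" ", PySem.Set.diff t1.2 t2.2)
  else (" ", PySem.Set.inter t1.2 t2.2)

def intersectSets (sets : List (String × List String)) : String × List String :=
  match sets with
  | [] => MYEMPTY
  | t :: rest => rest.foldl myIntersection t   -- tmp = sets[0]; for i in range(1, n): tmp = myIntersection(tmp, sets[i])

-- ===== PORT B =====
def intersectSets_alt (sets : List (String × List String)) : String × List String :=
  match sets with
  | [] => (" ", [])
  | [t] => t
  | _ =>
    let neg := (sets.filter (fun t => t.1 == "^")).map Prod.snd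
    let pos := (sets.filter (fun t => !(t.1 == "^"))).map Prod.snd
    match pos with
    | [] => ("^", neg.foldl PySem.Set.union PySem.Set.empty)     -- frozenset().union(*neg)
    | p0 :: ps => (" ", neg.foldl PySem.Set.diff (ps.foldl PySem.Set.inter p0))   -- pos[0].intersection(*ps).difference(*neg)

-- ===== PRECONDITION & SPEC =====
-- Each payload list encodes a Python frozenset, whose elements are distinct:
-- Pre_ only rules out encodings (lists with duplicates) that no Python input produces.
def Pre_intersectSets (sets : List (String × List String)) : Prop :=
  ∀ t ∈ sets, t.2.Nodup
instance (sets : List (String × List String)) : Decidable (Pre_intersectSets sets) := by unfold Pre_intersectSets; infer_instance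

def pvWitness_intersectSets : (List (String × List String)) :=
  [("^", ["a"]), (" ", ["a", "b"])]

def Spec_intersectSets (sets : List (String × List String)) (out : String × List String) : Prop := out = intersectSets_alt sets
instance (sets : List (String × List String)) (out : String × List String) : Decidable (Spec_intersectSets sets out) := by unfold Spec_intersectSets; infer_instance

-- ===== CLAIM (what is proved, stated in full; the proofs are below) =====
def Claim_equal_intersectSets : Prop := ∀ (sets : List (String × List String)), Dom_intersectSets sets → Pre_intersectSets sets → Spec_intersectSets sets (intersectSets sets)

-- ===== LEMMAS AND PROOFS =====

-- the per-element refinement A applies once the accumulated flag is ' '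
def pvStep (X : List String) (t : String × List String) : List String :=
  if t.1 == "^" then PySem.Set.diff X t.2 else PySem.Set.inter X t.2

-- the Boolean condition an element x must meet w.r.t. one tuple
def pvCond (t : String × List String) (x : String) : Bool :=
  if t.1 == "^" then !(t.2.contains x) else t.2.contains x

lemma pvStep_eq_filter (X : List String) (t : String × List String) :
    pvStep X t = X.filter (pvCond t) := by
  unfold pvStep pvCond
  by_cases h : t.1 == "^" <;> simp [h, PySem.Set.diff, PySem.Set.inter, PySem.Set.contains]

lemma foldl_pvStep_eq_filter (l : List (String × List String)) (X : List String) :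
    l.foldl pvStep X = X.filter (fun x => l.all (fun t => pvCond t x)) := by
  induction l generalizing X with
  | nil => simp
  | cons t l ih =>
      rw [List.foldl_cons, ih, pvStep_eq_filter, List.filter_filter]
      apply List.filter_congr
      intro x _
      simp [Bool.and_comm]

lemma foldl_inter_eq_filter (ss : List (List String)) (X : List String) :
    ss.foldl PySem.Set.inter X = X.filter (fun x => ss.all (fun s => s.contains x)) := by
  induction ss generalizing X with
  | nil => simp
  | cons s ss ih =>
      rw [List.foldl_cons, ih]
      show (List.filter _ X).filter _ = _
      rw [List.filter_filter]
      apply List.filter_congr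
      intro x _
      simp [PySem.Set.contains, Bool.and_comm]

lemma foldl_diff_eq_filter (ss : List (List String)) (X : List String) :
    ss.foldl PySem.Set.diff X = X.filter (fun x => ss.all (fun s => !(s.contains x))) := by
  induction ss generalizing X with
  | nil => simp
  | cons s ss ih =>
      rw [List.foldl_cons, ih]
      show (List.filter _ X).filter _ = _
      rw [List.filter_filter]
      apply List.filter_congr
      intro x _
      simp [PySem.Set.contains, Bool.and_comm]

lemma mem_foldl_union_decide (ss : List (List String)) (U : List String) (x : String) :
    decide (x ∈ ss.foldl PySem.Set.union U)
      = (decide (x ∈ U) || ss.any (fun s => decide (x ∈ s))) := by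
  induction ss generalizing U with
  | nil => simp
  | cons s ss ih =>
      rw [List.foldl_cons, ih]
      have h : decide (x ∈ PySem.Set.union U s) = (decide (x ∈ U) || decide (x ∈ s)) := by
        simp [PySem.Set.union, PySem.Set.mem_update]
      rw [h, List.any_cons, Bool.or_assoc]

-- A's loop once the flag has become ' ' (any non-'^' flag behaves the same)
lemma foldl_myI_space (l : List (String × List String)) (X : List String) :
    l.foldl myIntersection (" ", X) = (" ", l.foldl pvStep X) := by
  induction l generalizing X with
  | nil => rfl
  | cons t l ih =>
      rw [List.foldl_cons, List.foldl_cons]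
      have h : myIntersection (" ", X) t = (" ", pvStep X t) := by
        unfold myIntersection pvStep
        by_cases h : t.1 == "^" <;> simp [h]
      rw [h, ih]

lemma foldl_myI_pos (f : String) (hf : (f == "^") = false)
    (t : String × List String) (l : List (String × List String)) (X : List String) :
    (t :: l).foldl myIntersection (f, X) = (" ", (t :: l).foldl pvStep X) := by
  have h : myIntersection (f, X) t = (" ", pvStep X t) := by
    unfold myIntersection pvStep
    by_cases h : t.1 == "^" <;> simp [h, hf]
  rw [List.foldl_cons, h, List.foldl_cons, foldl_myI_space]

-- A's loop while every tuple seen is complemented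
lemma foldl_myI_neg_all (l : List (String × List String))
    (hall : l.all (fun s => s.1 == "^") = true) (U : List String) :
    l.foldl myIntersection ("^", U) = ("^", l.foldl (fun U s => PySem.Set.union U s.2) U) := by
  induction l generalizing U with
  | nil => rfl
  | cons s l ih =>
      simp only [List.all_cons, Bool.and_eq_true] at hall
      rw [List.foldl_cons, List.foldl_cons]
      have h : myIntersection ("^", U) s = ("^", PySem.Set.union U s.2) := by
        unfold myIntersection
        simp [hall.1]
      rw [h, ih hall.2]

lemma foldl_myI_neg_split (rn : List (String × List String))
    (hall : rn.all (fun s => s.1 == "^") = true)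
    (s : String × List String) (hs : (s.1 == "^") = false)
    (r2 : List (String × List String)) (U : List String) :
    (rn ++ s :: r2).foldl myIntersection ("^", U)
      = (" ", r2.foldl pvStep (PySem.Set.diff s.2 (rn.foldl (fun U t => PySem.Set.union U t.2) U))) := by
  rw [List.foldl_append, foldl_myI_neg_all rn hall U, List.foldl_cons]
  have h : myIntersection ("^", rn.foldl (fun U t => PySem.Set.union U t.2) U) s
      = (" ", PySem.Set.diff s.2 (rn.foldl (fun U t => PySem.Set.union U t.2) U)) := by
    unfold myIntersection
    simp [hs]
  rw [h, foldl_myI_space]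

-- splitting the all-quantified condition into its positive and complemented parts
lemma all_pvCond_split (r : List (String × List String)) (x : String) :
    r.all (fun t => pvCond t x)
      = (((r.filter (fun t => !(t.1 == "^"))).map Prod.snd).all (fun s => decide (x ∈ s))
         && ((r.filter (fun t => t.1 == "^")).map Prod.snd).all (fun s => !decide (x ∈ s))) := by
  induction r with
  | nil => rfl
  | cons t r ih =>
      by_cases h : (t.1 == "^") = true
      · rw [List.all_cons, ih]
        simp only [List.filter_cons, h, Bool.not_true, Bool.false_eq_true, if_false, if_true,
          List.map_cons, List.all_cons, pvCond, List.contains_eq_mem]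
        rw [Bool.and_left_comm]
      · have h' : (t.1 == "^") = false := by simpa using h
        rw [List.all_cons, ih]
        simp only [List.filter_cons, h', Bool.not_false, Bool.false_eq_true, if_false, if_true,
          List.map_cons, List.all_cons, pvCond, List.contains_eq_mem]
        rw [Bool.and_assoc]

lemma not_any_eq_all_not (ss : List (List String)) (x : String) :
    (!(ss.any (fun s => decide (x ∈ s)))) = ss.all (fun s => !decide (x ∈ s)) := by
  induction ss with
  | nil => rfl
  | cons s ss ih => rw [List.any_cons, Bool.not_or, ih, List.all_cons]

-- intersectSets_alt on a two-or-more-element list, reduced past its first two matches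
lemma alt_cons_cons (u v : String × List String) (w : List (String × List String)) :
    intersectSets_alt (u :: v :: w) =
      (match (((u :: v :: w).filter (fun t => !(t.1 == "^"))).map Prod.snd : List (List String)) with
       | [] => ("^", (((u :: v :: w).filter (fun t => t.1 == "^")).map Prod.snd).foldl PySem.Set.union PySem.Set.empty)
       | p0 :: ps => (" ", (((u :: v :: w).filter (fun t => t.1 == "^")).map Prod.snd).foldl PySem.Set.diff (ps.foldl PySem.Set.inter p0))) := rfl

-- ===== VERDICT (by name: the statement is the Claim_ definition above) =====
theorem intersectSets_spec : Claim_equal_intersectSets := by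
  intro sets _ hpre
  unfold Spec_intersectSets
  match sets with
  | [] => rfl
  | [t] => rfl
  | t :: a :: r =>
    obtain ⟨f, X⟩ := t
    have hX : X.Nodup := hpre (f, X) (List.mem_cons_self ..)
    have hA0 : intersectSets ((f, X) :: a :: r) = (a :: r).foldl myIntersection (f, X) := rfl
    rw [alt_cons_cons, hA0]
    by_cases hf : (f == "^") = true
    · have hfeq : f = "^" := by simpa using hf
      subst hfeq
      by_cases hall : ((a :: r).all (fun s => s.1 == "^")) = true
      · -- every set is complemented: both sides carry flag '^'
        rw [foldl_myI_neg_all _ hall]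
        have hposnil : (((("^" : String), X) :: a :: r).filter (fun u => !(u.1 == "^"))) = [] := by
          rw [List.filter_eq_nil_iff]
          intro u hu
          rcases List.mem_cons.1 hu with rfl | hu
          · simp
          · have := (List.all_eq_true.1 hall) u hu
            simp [this]
        have hnegself : (((("^" : String), X) :: a :: r).filter (fun u => u.1 == "^")) = ("^", X) :: a :: r := by
          rw [List.filter_eq_self]
          intro u hu
          rcases List.mem_cons.1 hu with rfl | hu
          · simp
          · exact (List.all_eq_true.1 hall) u hu
        rw [hposnil, hnegself]
        simp only [List.map_cons, List.foldl_cons]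
        have h0 : PySem.Set.union PySem.Set.empty X = X := by
          show PySem.Set.update [] X = X
          rw [PySem.Set.update_nil_left, PySem.Set.ofList_eq_self_of_nodup X hX]
        simp only [List.map_nil]
        rw [h0, List.foldl_map]
      · -- a first non-complemented set exists: split at it
        have hsplit : (a :: r).takeWhile (fun s => s.1 == "^") ++ (a :: r).dropWhile (fun s => s.1 == "^") = a :: r :=
          List.takeWhile_append_dropWhile
        have hdrne : (a :: r).dropWhile (fun s => s.1 == "^") ≠ [] := by
          intro hnil
          exact hall (List.all_eq_true.2 (fun u hu => List.dropWhile_eq_nil_iff.1 hnil u hu))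
        obtain ⟨s, r2, hdr⟩ := List.exists_cons_of_ne_nil hdrne
        have hs : (s.1 == "^") = false := by
          have := List.head_dropWhile_not (l := a :: r) (fun s => s.1 == "^") (by simp [hdr])
          simpa [hdr] using this
        have hrn : ((a :: r).takeWhile (fun s => s.1 == "^")).all (fun s => s.1 == "^") = true :=
          List.all_takeWhile
        rw [← hsplit, hdr, foldl_myI_neg_split _ hrn s hs]
        set rn := (a :: r).takeWhile (fun s => s.1 == "^") with hrndef
        -- B's filters over the decomposed list
        have hrnposnil : (rn.filter (fun u => !(u.1 == "^"))) = [] := by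
          rw [List.filter_eq_nil_iff]
          intro u hu
          have := (List.all_eq_true.1 hrn) u hu
          simp [this]
        have hrnnegself : (rn.filter (fun u => u.1 == "^")) = rn := by
          rw [List.filter_eq_self]
          exact fun u hu => (List.all_eq_true.1 hrn) u hu
        simp only [List.filter_cons, List.filter_append, hrnposnil, hrnnegself, hs,
          beq_self_eq_true, Bool.not_true, Bool.not_false, Bool.false_eq_true, if_false, if_true,
          List.map_cons, List.map_append, List.nil_append]
        -- both payloads are filters of s.2
        rw [foldl_pvStep_eq_filter, foldl_inter_eq_filter, foldl_diff_eq_filter]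
        show ((" " : String),
            (List.filter _ s.2).filter _) = _
        rw [List.filter_filter, List.filter_filter]
        refine congrArg _ (List.filter_congr ?_)
        intro x hx
        -- membership in the accumulated union
        have hW : decide (x ∈ rn.foldl (fun U t => PySem.Set.union U t.2) X)
            = (decide (x ∈ X) || (rn.map Prod.snd).any (fun s => decide (x ∈ s))) := by
          rw [← List.foldl_map, mem_foldl_union_decide]
        simp only [PySem.Set.contains] at hx ⊢
        simp only [List.contains_eq_mem, hW, all_pvCond_split, List.all_cons, List.all_append,
          Bool.not_or, not_any_eq_all_not]
        cases decide (x ∈ X) <;>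
          cases ((rn.map Prod.snd).all fun s => !decide (x ∈ s)) <;>
          cases ((List.map Prod.snd (List.filter (fun t => !t.1 == "^") r2)).all fun s => decide (x ∈ s)) <;>
          cases ((List.map Prod.snd (List.filter (fun t => t.1 == "^") r2)).all fun s => !decide (x ∈ s)) <;>
          simp
    · -- the first set is not complemented: flag ' ' and a plain filter of its payload
      have hf' : (f == "^") = false := by simpa using hf
      rw [foldl_myI_pos f hf', foldl_pvStep_eq_filter]
      have hposc : List.filter (fun t => !(t.1 == "^")) ((f, X) :: a :: r)
          = (f, X) :: List.filter (fun t => !(t.1 == "^")) (a :: r) := by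
        rw [List.filter_cons]; simp [hf']
      have hnegc : List.filter (fun t => t.1 == "^") ((f, X) :: a :: r)
          = List.filter (fun t => t.1 == "^") (a :: r) := by
        rw [List.filter_cons]; simp [hf']
      rw [hposc, hnegc]
      simp only [List.map_cons]
      rw [foldl_inter_eq_filter, foldl_diff_eq_filter, List.filter_filter]
      refine congrArg _ (List.filter_congr ?_)
      intro x hx
      simp only [List.contains_eq_mem, all_pvCond_split]
      rw [Bool.and_comm]
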